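-- pv_equiv track=rewrite | github.com/lawvs/Algorithm-Training | leetcode/824.goat-latin.py | toGoatLatin
-- ===== SOURCE A (Python) =====
-- def toGoatLatin(S):
--     """
--     :type S: str
--     :rtype: str
--     """
--     S = S.split(' ')
--     suffix = 'maa'
--     vowels = ['a', 'e', 'i', 'o', 'u']
--     S = map(lambda word: word if any(word[0].lower() == vowel for vowel in vowels) else word[1:] + word[0] , S)
--     res = []
--     for word in S:
--         res.append(word + suffix)
--         suffix += 'a'
--     return ' '.join(res)
-- ===== SOURCE B (Python) =====
-- def toGoatLatin(S):
--     # Single character-level pass over S: no split(), no per-word list, no join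
--     # with a separator; words are detected at space boundaries and emitted
--     # (rotated + suffix from the running word number) as they close.
--     def goat(w, i):
--         body = w if w[0].lower() in 'aeiou' else w[1:] + w[0]
--         return body + 'm' + 'a' * (i + 1)
--
--     res = []
--     word = ''
--     idx = 1
--     for ch in S:
--         if ch == ' ':
--             res.append(goat(word, idx))
--             res.append(' ')
--             word = ''
--             idx += 1
--         else:
--             word += ch
--     res.append(goat(word, idx))
--     return ''.join(res)
-- ===== Notes on version B (the rewrite author's own statement) =====
-- stated objective: alternative
-- what changed: Replaces A's split/map/accumulator-loop/join pipeline with a single character-level scan of S that detects word boundaries itself and emits each transformed word (suffix derived from a running word counter) as it closes.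
import Mathlib
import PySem

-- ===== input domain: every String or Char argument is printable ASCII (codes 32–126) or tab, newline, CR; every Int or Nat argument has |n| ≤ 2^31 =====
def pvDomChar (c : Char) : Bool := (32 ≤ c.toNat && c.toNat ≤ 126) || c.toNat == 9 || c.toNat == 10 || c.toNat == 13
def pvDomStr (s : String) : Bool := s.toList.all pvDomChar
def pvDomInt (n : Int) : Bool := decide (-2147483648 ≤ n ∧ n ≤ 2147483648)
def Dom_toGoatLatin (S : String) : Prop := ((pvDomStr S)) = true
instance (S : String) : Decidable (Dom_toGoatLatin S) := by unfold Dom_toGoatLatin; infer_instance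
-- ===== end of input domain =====

-- B replaces A's split/map/suffix-accumulator/join pipeline with one character-level
-- scan of S that detects word boundaries itself (objective: alternative).


-- ===== PORT A =====
def pvVowelsA : List Char := ['a', 'e', 'i', 'o', 'u']

-- lambda word: word if any(word[0].lower() == vowel for vowel in vowels) else word[1:] + word[0]
-- word[0] raises IndexError on an empty word (Pre_ excludes that); the `none` arm is a totality guard only.
def pvRotA (w : List Char) : List Char :=
  match PySem.List.pyGet? w 0 with
  | none => w
  | some c =>
    if pvVowelsA.any (fun v => PySem.Chars.lowerChar c == v) then w
    else PySem.List.slice w (some 1) none ++ [c]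

def toGoatLatin (S : String) : String :=
  let ws := PySem.Chars.splitOn S.toList [' ']
  let ws2 := ws.map pvRotA
  let st := ws2.foldl
    (fun (st : List (List Char) × List Char) w => (st.1 ++ [w ++ st.2], st.2 ++ ['a']))
    ([], ['m', 'a', 'a'])
  String.ofList (PySem.Chars.join [' '] st.1)

-- ===== PORT B =====
-- goat(w, i): body = w if w[0].lower() in 'aeiou' else w[1:] + w[0]; body + 'm' + 'a'*(i+1).
-- w[0] is a single char, so 'in' on the string 'aeiou' is membership; w[0] raises IndexError
-- on an empty word (Pre_ excludes that); the `none` arm is a totality guard only.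
-- i is the running 1-based word counter, a Nat, so 'a'*(i+1) is List.replicate (i+1) 'a'.
def pvGoat (w : List Char) (i : Nat) : List Char :=
  let body :=
    match PySem.List.pyGet? w 0 with
    | none => w
    | some c =>
      if (['a', 'e', 'i', 'o', 'u'] : List Char).contains (PySem.Chars.lowerChar c) then w
      else PySem.List.slice w (some 1) none ++ [c]
  body ++ ['m'] ++ List.replicate (i + 1) 'a'

-- loop body: state = (res, word, idx)
def pvStepB (st : List (List Char) × List Char × Nat) (ch : Char) :
    List (List Char) × List Char × Nat :=
  if ch == ' ' then (st.1 ++ [pvGoat st.2.1 st.2.2, [' ']], [], st.2.2 + 1)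
  else (st.1, st.2.1 ++ [ch], st.2.2)

def toGoatLatin_alt (S : String) : String :=
  let st := S.toList.foldl pvStepB ([], [], 1)
  String.ofList (PySem.Chars.join [] (st.1 ++ [pvGoat st.2.1 st.2.2]))

-- ===== PRECONDITION & SPEC =====
-- Pre_ excludes exactly the inputs whose split on the space separator contains an empty
-- word: on those, word[0] raises IndexError in A (and likewise in B).
def Pre_toGoatLatin (S : String) : Prop := [] ∉ PySem.Chars.splitOn S.toList [' ']
instance (S : String) : Decidable (Pre_toGoatLatin S) := by unfold Pre_toGoatLatin; infer_instance

def pvWitness_toGoatLatin : String := "I speak Goat Latin"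

def Spec_toGoatLatin (S : String) (out : String) : Prop := out = toGoatLatin_alt S
instance (S : String) (out : String) : Decidable (Spec_toGoatLatin S out) := by unfold Spec_toGoatLatin; infer_instance

-- ===== CLAIM (what is proved, stated in full; the proofs are below) =====
def Claim_equal_toGoatLatin : Prop := ∀ (S : String), Dom_toGoatLatin S → Pre_toGoatLatin S → Spec_toGoatLatin S (toGoatLatin S)

-- ===== LEMMAS AND PROOFS =====

-- common characterisation: the list of words of S split on ' ', as structural recursion
def pvConsHead (p : List Char) : List (List Char) → List (List Char)
  | [] => [p]
  | w :: ws => (p ++ w) :: ws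

def pvSplit : List Char → List (List Char)
  | [] => [[]]
  | c :: cs => if c = ' ' then [] :: pvSplit cs else pvConsHead [c] (pvSplit cs)

-- the Goat-Latin rendering of a word list, word numbers starting at i
def pvGL : List (List Char) → Nat → List Char
  | [], _ => []
  | [w], i => pvGoat w i
  | w :: w' :: ws, i => pvGoat w i ++ ' ' :: pvGL (w' :: ws) (i + 1)

lemma pvSplit_ne_nil (cs : List Char) : pvSplit cs ≠ [] := by
  cases cs with
  | nil => simp [pvSplit]
  | cons c cs =>
    simp only [pvSplit]
    split
    · simp
    · cases h : pvSplit cs <;> simp [pvConsHead]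

lemma pvConsHead_consHead (a b : List Char) (ws : List (List Char)) :
    pvConsHead a (pvConsHead b ws) = pvConsHead (a ++ b) ws := by
  cases ws <;> simp [pvConsHead]

lemma pvConsHead_nil (ws : List (List Char)) (h : ws ≠ []) : pvConsHead [] ws = ws := by
  cases ws with
  | nil => exact absurd rfl h
  | cons w ws => simp [pvConsHead]

lemma pv_go_spec (cs : List Char) : ∀ (fuel : Nat) (cur : List Char)
    (acc : List (List Char)), cs.length ≤ fuel →
    PySem.Chars.splitOn.go [' '] fuel cs cur acc
      = acc.reverse ++ pvConsHead cur.reverse (pvSplit cs) := by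
  induction cs with
  | nil =>
    intro fuel cur acc _
    cases fuel <;> simp [PySem.Chars.splitOn.go, pvSplit, pvConsHead]
  | cons c rest ih =>
    intro fuel cur acc hle
    cases fuel with
    | zero => simp at hle
    | succ f =>
      simp only [List.length_cons, Nat.add_le_add_iff_right] at hle
      simp only [PySem.Chars.splitOn.go]
      by_cases hc : c = ' '
      · subst hc
        simp only [List.isPrefixOf, BEq.rfl, Bool.true_and,
          if_true, List.length_cons, List.length_nil, List.drop_succ_cons, List.drop_zero]
        rw [ih f [] (cur.reverse :: acc) hle]
        rw [show ([] : List Char).reverse = [] from rfl,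
          pvConsHead_nil _ (pvSplit_ne_nil rest)]
        simp [pvSplit, pvConsHead]
      · have hpre : [' '].isPrefixOf (c :: rest) = false := by
          simp [List.isPrefixOf]
          exact fun h => absurd h.symm hc
        rw [hpre]
        simp only [if_false, Bool.false_eq_true]
        rw [ih f (c :: cur) acc hle]
        simp [pvSplit, hc, pvConsHead_consHead]

lemma pv_splitOn_eq (cs : List Char) :
    PySem.Chars.splitOn cs [' '] = pvSplit cs := by
  show PySem.Chars.splitOn.go [' '] (cs.length + 1) cs [] [] = _
  rw [pv_go_spec cs (cs.length + 1) [] [] (by omega)]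
  simp [pvConsHead_nil _ (pvSplit_ne_nil cs)]

-- join with the empty separator is concatenation
lemma pv_join_nil_eq (ps : List (List Char)) :
    PySem.Chars.join [] ps = ps.flatten := by
  induction ps with
  | nil => rfl
  | cons p ps ih =>
    cases ps with
    | nil => simp [PySem.Chars.join_singleton]
    | cons q rest => rw [PySem.Chars.join_cons_cons, ih]; simp

-- B's character scan computes pvGL over pvSplit
lemma pv_scanB (cs : List Char) : ∀ (res : List (List Char)) (cur : List Char) (i : Nat),
    ((cs.foldl pvStepB (res, cur, i)).1
      ++ [pvGoat (cs.foldl pvStepB (res, cur, i)).2.1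
            (cs.foldl pvStepB (res, cur, i)).2.2]).flatten
    = res.flatten ++ pvGL (pvConsHead cur (pvSplit cs)) i := by
  induction cs with
  | nil =>
    intro res cur i
    simp [pvSplit, pvConsHead, pvGL]
  | cons c rest ih =>
    intro res cur i
    by_cases hc : c = ' '
    · subst hc
      simp only [List.foldl_cons, pvStepB, BEq.rfl, if_true]
      rw [ih (res ++ [pvGoat cur i, [' ']]) [] (i + 1)]
      rw [pvConsHead_nil _ (pvSplit_ne_nil rest)]
      simp only [pvSplit, if_true]
      obtain ⟨w, ws, hw⟩ : ∃ w ws, pvSplit rest = w :: ws := by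
        cases h : pvSplit rest with
        | nil => exact absurd h (pvSplit_ne_nil rest)
        | cons w ws => exact ⟨w, ws, rfl⟩
      rw [hw]
      simp [pvConsHead, pvGL]
    · have hbeq : (c == ' ') = false := by simp [hc]
      simp only [List.foldl_cons, pvStepB, hbeq, Bool.false_eq_true, if_false]
      rw [ih res (cur ++ [c]) i]
      simp only [pvSplit, hc, if_false, pvConsHead_consHead]
    
-- A's enumerate-free helpers: the map pass commutes with enumeration
lemma pv_enumerate_map {α β : Type} (f : α → β) (ws : List α) (s : Int) :
    PySem.List.enumerate (ws.map f) s
      = (PySem.List.enumerate ws s).map (fun p => (p.1, f p.2)) := by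
  induction ws generalizing s with
  | nil => rfl
  | cons x xs ih => simp [PySem.List.enumerate_cons, ih]

-- A's suffix-accumulator loop produces the indexed words
lemma pv_loopA (ws : List (List Char)) :
    ∀ (acc : List (List Char)) (s : Nat),
    (ws.foldl
      (fun (st : List (List Char) × List Char) w => (st.1 ++ [w ++ st.2], st.2 ++ ['a']))
      (acc, 'm' :: List.replicate (s + 2) 'a')).1
    = acc ++ (PySem.List.enumerate ws (s : Int)).map
        (fun p => p.2 ++ ['m'] ++ PySem.List.pyRepeat ['a'] (p.1 + 2)) := by
  induction ws with
  | nil => intro acc s; simp [PySem.List.enumerate]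
  | cons w ws ih =>
    intro acc s
    have hsuf : ('m' :: List.replicate (s + 2) 'a') ++ ['a']
        = 'm' :: List.replicate (s + 1 + 2) 'a' := by
      rw [List.cons_append, ← List.replicate_succ', show s + 2 + 1 = s + 1 + 2 from by omega]
    simp only [List.foldl_cons, hsuf]
    rw [ih (acc ++ [w ++ ('m' :: List.replicate (s + 2) 'a')]) (s + 1)]
    rw [PySem.List.enumerate_cons]
    push_cast
    simp
    omega

-- the two rotations agree, and A's indexed word is pvGoat
lemma pv_word_eq (w : List Char) (i : Nat) :
    pvRotA w ++ ['m'] ++ PySem.List.pyRepeat ['a'] ((i : Int) + 2) = pvGoat w (i + 1) := by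
  have hrep : PySem.List.pyRepeat ['a'] ((i : Int) + 2) = List.replicate (i + 1 + 1) 'a' := by
    simp only [PySem.List.pyRepeat]
    rw [show ((i : Int) + 2).toNat = i + 2 from by omega]
    rw [show i + 2 = i + 1 + 1 from rfl]
    induction (i + 1 + 1) with
    | zero => rfl
    | succ n ihn => simp [List.replicate_succ, ihn]
  rw [hrep]
  unfold pvRotA pvGoat
  cases PySem.List.pyGet? w 0 with
  | none => rfl
  | some c =>
    simp only [pvVowelsA, List.any_cons, List.any_nil, List.contains_cons,
      List.contains_nil, Bool.or_false]

-- joining A's indexed words with ' ' is pvGL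
lemma pv_joinA (ws : List (List Char)) : ∀ (i : Nat),
    PySem.Chars.join [' ']
      ((PySem.List.enumerate ws (i : Int)).map
        (fun p => pvRotA p.2 ++ ['m'] ++ PySem.List.pyRepeat ['a'] (p.1 + 2)))
    = pvGL ws (i + 1) := by
  induction ws with
  | nil => intro i; simp [PySem.List.enumerate, PySem.Chars.join_nil, pvGL]
  | cons w ws ih =>
    intro i
    rw [PySem.List.enumerate_cons]
    cases ws with
    | nil =>
      simp only [PySem.List.enumerate, List.map_cons, List.map_nil,
        PySem.Chars.join_singleton, pvGL]
      exact pv_word_eq w i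
    | cons w' ws' =>
      have h2 := ih (i + 1)
      push_cast at h2
      simp only [PySem.List.enumerate_cons, List.map_cons,
        PySem.Chars.join_cons_cons] at h2 ⊢
      rw [h2, pv_word_eq w i]
      simp [pvGL]

-- ===== VERDICT (by name: the statement is the Claim_ definition above) =====
theorem toGoatLatin_spec : Claim_equal_toGoatLatin := by
  intro S _ _
  unfold Spec_toGoatLatin toGoatLatin toGoatLatin_alt
  dsimp only
  rw [pv_join_nil_eq, pv_scanB S.toList [] [] 1]
  rw [pvConsHead_nil _ (pvSplit_ne_nil S.toList)]
  have hA := pv_loopA ((PySem.Chars.splitOn S.toList [' ']).map pvRotA) [] 0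
  simp only [List.replicate, Int.natCast_zero, List.nil_append] at hA
  rw [hA, pv_enumerate_map]
  rw [List.map_map]
  have := pv_joinA (PySem.Chars.splitOn S.toList [' ']) 0
  simp only [Int.natCast_zero] at this
  rw [show ((fun p : Int × List Char => p.2 ++ ['m'] ++ PySem.List.pyRepeat ['a'] (p.1 + 2)) ∘
        (fun p : Int × List Char => (p.1, pvRotA p.2)))
      = (fun p : Int × List Char => pvRotA p.2 ++ ['m'] ++ PySem.List.pyRepeat ['a'] (p.1 + 2))
    from rfl]
  rw [this, pv_splitOn_eq]
  simp [List.flatten]
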